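-- pv_equiv track=rewrite | github.com/KausikN/BTech_ImageProcessing_Files | Assignment1/Q2.py | MatFreqDist
-- ===== SOURCE A (Python) =====
-- def MatFreqDist(matrix):
--     freq = {}
--
--     for row in matrix:
--         for val in row:
--             freq[val] = 0
--
--     for row in matrix:
--         for val in row:
--             freq[val] += 1
--
--     return freq
-- ===== SOURCE B (Python) =====
-- def MatFreqDist(matrix):
--     flat = [v for row in matrix for v in row]
--     keys = []
--     seen = set()
--     for v in flat:
--         if v not in seen:
--             seen.add(v)
--             keys.append(v)
--     return {k: flat.count(k) for k in keys}
-- ===== Notes on version B (the rewrite author's own statement) =====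
-- stated objective: alternative
-- what changed: Instead of counting incrementally in a dict, B flattens the matrix, collects the distinct values in first-occurrence order with a seen-set, and builds the result with one list.count scan per distinct value.
import Mathlib
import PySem

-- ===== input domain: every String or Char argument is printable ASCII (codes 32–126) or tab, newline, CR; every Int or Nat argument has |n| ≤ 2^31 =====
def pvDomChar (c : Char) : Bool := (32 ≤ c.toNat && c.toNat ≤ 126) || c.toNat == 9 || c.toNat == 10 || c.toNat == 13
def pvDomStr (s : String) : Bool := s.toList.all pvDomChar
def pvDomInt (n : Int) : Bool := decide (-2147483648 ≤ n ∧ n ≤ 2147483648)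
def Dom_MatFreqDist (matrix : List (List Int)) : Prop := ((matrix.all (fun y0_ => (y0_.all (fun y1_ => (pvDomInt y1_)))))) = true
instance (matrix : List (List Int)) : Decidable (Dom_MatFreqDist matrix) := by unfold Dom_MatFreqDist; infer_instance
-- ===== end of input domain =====

-- B replaces A's incremental dict counting (zero-init pass, then increment pass) with a
-- different strategy: flatten, collect distinct values in first-occurrence order via a
-- seen-set, then one list.count scan per distinct value; same plain dict result.

-- ===== PORT A =====
-- two separate nested loops: first initializes every key to 0, second increments.
-- freq[val] += 1 is ported as Dict.modify val 0 (· + 1); exact here since the first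
-- pass guarantees the key is present, so the default 0 is never used.
def MatFreqDist (matrix : List (List Int)) : List (Int × Int) :=
  let freq : PySem.Dict Int Int := PySem.Dict.empty
  let freq := matrix.foldl (fun d row => row.foldl (fun d v => d.insert v (0 : Int)) d) freq
  let freq := matrix.foldl (fun d row => row.foldl (fun d v => d.modify v 0 (· + 1)) d) freq
  freq.items

-- ===== PORT B =====
-- flat = [v for row in matrix for v in row]; keys collected in first-occurrence order
-- with a seen-set; result = {k: flat.count(k) for k in keys}
def MatFreqDist_alt (matrix : List (List Int)) : List (Int × Int) :=
  let flat := matrix.flatMap (fun row => row)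
  let st := flat.foldl
    (fun (st : List Int × PySem.Set Int) v =>
      if st.2.contains v then st else (st.1 ++ [v], st.2.add v))
    ([], PySem.Set.empty)
  (st.1.foldl (fun d k => d.insert k (flat.count k : Int))
    (PySem.Dict.empty : PySem.Dict Int Int)).items

-- ===== PRECONDITION & SPEC =====
def Spec_MatFreqDist (matrix : List (List Int)) (out : List (Int × Int)) : Prop := out = MatFreqDist_alt matrix
instance (matrix : List (List Int)) (out : List (Int × Int)) : Decidable (Spec_MatFreqDist matrix out) := by unfold Spec_MatFreqDist; infer_instance

-- ===== CLAIM =====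
def Claim_equal_MatFreqDist : Prop := ∀ (matrix : List (List Int)), Dom_MatFreqDist matrix → Spec_MatFreqDist matrix (MatFreqDist matrix)

-- ===== LEMMAS AND PROOFS =====

-- Set.update is a no-op when every element is already present
theorem set_update_of_subset (xs s : List Int) (h : ∀ x ∈ xs, x ∈ s) :
    PySem.Set.update s xs = s := by
  induction xs generalizing s with
  | nil => rfl
  | cons x xs ih =>
      have hx : x ∈ s := h x (List.mem_cons_self)
      have : PySem.Set.add s x = s := by
        simp [PySem.Set.add, PySem.Set.contains, hx]
      simpa [PySem.Set.update, List.foldl_cons, this] using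
        ih s (fun y hy => h y (List.mem_cons_of_mem _ hy))

-- every lookup after A's zero-initialization pass is 0
theorem getD_init_zero (l : List Int) (d : PySem.Dict Int Int)
    (hd : ∀ k, d.getD k 0 = 0) (k : Int) :
    (l.foldl (fun d v => d.insert v (0 : Int)) d).getD k 0 = 0 := by
  induction l generalizing d with
  | nil => exact hd k
  | cons x xs ih =>
      refine ih _ (fun j => ?_)
      rw [PySem.Dict.getD_insert]
      split_ifs <;> simp [hd]

theorem MatFreqDist_eq_items (matrix : List (List Int)) :
    MatFreqDist matrix
      = (PySem.Set.ofList matrix.flatten).map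
          (fun k => (k, (matrix.flatten.count k : Int))) := by
  unfold MatFreqDist
  simp only [← List.foldl_flatten]
  set vs := matrix.flatten with hvs
  set d1 := vs.foldl (fun d v => d.insert v (0 : Int)) PySem.Dict.empty with hd1
  have hkeys1 : d1.keys = PySem.Set.ofList vs := by
    rw [hd1, PySem.Dict.keys_foldl_insert]
    simp [PySem.Set.ofList_eq_foldl, PySem.Set.update, PySem.Dict.keys_empty]
  have hnd1 : d1.keys.Nodup :=
    PySem.Dict.nodup_keys_foldl_insert _ _ _ (by simp [PySem.Dict.keys_empty])
  set d2 := vs.foldl (fun d v => d.modify v 0 (· + 1)) d1 with hd2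
  have hkeys2 : d2.keys = PySem.Set.ofList vs := by
    rw [hd2, PySem.Dict.keys_foldl_modify, hkeys1]
    exact set_update_of_subset _ _ (fun x hx => by
      simpa [PySem.Set.mem_ofList] using hx)
  have hnd2 : d2.keys.Nodup := hkeys2 ▸ (PySem.Set.nodup_ofList vs)
  have hget : ∀ k, d2.getD k 0 = (vs.count k : Int) := by
    intro k
    rw [hd2, PySem.Dict.getD_foldl_modify_add_one,
      getD_init_zero vs PySem.Dict.empty (fun j => by simp [PySem.Dict.getD_empty]) k]
    ring
  rw [PySem.Dict.items_eq_map_keys d2 hnd2 0, hkeys2]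
  exact List.map_congr_left (fun k _ => by rw [hget k])

-- B's seen-set loop: the keys list tracks the set exactly (both start equal and stay equal)
theorem keys_loop_eq_set (l : List Int) (s : PySem.Set Int) :
    l.foldl
      (fun (st : List Int × PySem.Set Int) v =>
        if st.2.contains v then st else (st.1 ++ [v], st.2.add v)) (s, s)
      = (l.foldl PySem.Set.add s, l.foldl PySem.Set.add s) := by
  induction l generalizing s with
  | nil => rfl
  | cons x xs ih =>
      rw [List.foldl_cons, List.foldl_cons]
      by_cases hx : s.contains x = true
      · have hadd : PySem.Set.add s x = s := by
          unfold PySem.Set.add; rw [if_pos hx]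
        rw [if_pos hx, hadd]
        exact ih s
      · have hadd : PySem.Set.add s x = s ++ [x] := by
          unfold PySem.Set.add; rw [if_neg hx]
        rw [if_neg hx, hadd]
        exact ih (s ++ [x])

theorem MatFreqDist_alt_eq_items (matrix : List (List Int)) :
    MatFreqDist_alt matrix
      = (PySem.Set.ofList matrix.flatten).map
          (fun k => (k, (matrix.flatten.count k : Int))) := by
  unfold MatFreqDist_alt
  dsimp only
  have hflat : matrix.flatMap (fun row => row) = matrix.flatten := by
    simp [List.flatMap_def]
  rw [hflat]
  set vs := matrix.flatten with hvs
  have hempty : (PySem.Set.empty : PySem.Set Int) = ([] : List Int) := rfl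
  rw [hempty, keys_loop_eq_set vs []]
  have hkeys : vs.foldl PySem.Set.add [] = PySem.Set.ofList vs :=
    (PySem.Set.ofList_eq_foldl vs).symm
  rw [hkeys]
  rw [PySem.Dict.items_foldl_insert_fresh (k := fun k => k)
        (v := fun k => (vs.count k : Int))
        (d := (PySem.Dict.empty : PySem.Dict Int Int))
        (l := PySem.Set.ofList vs)
        (fun a _ => by simp [PySem.Dict.contains_empty])
        (by simp only [List.map_id']; exact PySem.Set.nodup_ofList vs)]
  rfl

-- ===== VERDICT =====
theorem MatFreqDist_spec : Claim_equal_MatFreqDist := by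
  intro matrix _
  unfold Spec_MatFreqDist
  rw [MatFreqDist_eq_items, MatFreqDist_alt_eq_items]
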